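-- pv_equiv track=rewrite | github.com/i-am-unbekannt/BLITZPROXY | proxy-GetRawFiles.py | clean_proxy_list
-- ===== SOURCE A (Python) =====
-- FILTER_START = "---------- [ ProxyList.to"
--
-- FILTER_END = "For the full list go to:"
--
-- def clean_proxy_list(lines):
--     cleaned = []
--     skip_rest = False
--     for line in lines:
--         if line.startswith(FILTER_START):
--             continue
--         if FILTER_END in line:
--             skip_rest = True
--             continue
--         if skip_rest:
--             continue
--         if line.strip():
--             cleaned.append(line.strip())
--     return cleaned
-- ===== SOURCE B (Python) =====
-- FILTER_START = "---------- [ ProxyList.to"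
--
-- FILTER_END = "For the full list go to:"
--
-- def clean_proxy_list(lines):
--     # Phase 1: find the truncation boundary (first non-header line containing FILTER_END).
--     cut = next((i for i, l in enumerate(lines)
--                 if FILTER_END in l and not l.startswith(FILTER_START)), len(lines))
--     # Phase 2: strip/filter the prefix.
--     return [s for l in lines[:cut]
--             if not l.startswith(FILTER_START) and (s := l.strip())]
-- ===== Notes on version B (the rewrite author's own statement) =====
-- stated objective: alternative
-- what changed: Replaces A's single stateful pass with a carried skip_rest flag by two stateless phases: first locate the truncation boundary with a generator/next scan, then build the result as one comprehension over that prefix.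
import Mathlib
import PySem

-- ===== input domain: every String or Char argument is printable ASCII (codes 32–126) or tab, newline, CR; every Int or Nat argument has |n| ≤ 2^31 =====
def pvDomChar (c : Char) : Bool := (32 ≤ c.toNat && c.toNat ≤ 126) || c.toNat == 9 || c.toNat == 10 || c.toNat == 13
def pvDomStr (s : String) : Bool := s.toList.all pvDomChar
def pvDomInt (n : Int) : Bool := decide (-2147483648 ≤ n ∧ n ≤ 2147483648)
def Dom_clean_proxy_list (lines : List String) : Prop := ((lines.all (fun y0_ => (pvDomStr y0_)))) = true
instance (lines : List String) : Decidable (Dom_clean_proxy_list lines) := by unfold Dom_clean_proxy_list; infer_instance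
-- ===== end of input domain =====

-- B replaces A's single pass with a carried skip_rest flag by boundary detection (find the cut index) followed by a stateless filter/strip comprehension over the prefix; same cost, different decomposition.


def pvFS : String := "---------- [ ProxyList.to"
def pvFE : String := "For the full list go to:"

-- ===== PORT A =====
-- state: (cleaned, skip_rest); the loop body mirrors A's branch order
def clean_proxy_list (lines : List String) : List String :=
  (lines.foldl (fun (st : List String × Bool) line =>
      if PySem.Str.startswith line pvFS then st
      else if PySem.Str.isIn pvFE line then (st.1, true)
      else if st.2 then st
      else if PySem.Str.strip line != "" then (st.1 ++ [PySem.Str.strip line], st.2)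
      else st)
    ([], false)).1

-- ===== PORT B =====
-- phase 1: cut = index of the first non-header line containing pvFE (len if none); phase 2: comprehension over the prefix
def clean_proxy_list_alt (lines : List String) : List String :=
  let cut := (lines.findIdx? (fun l =>
      PySem.Str.isIn pvFE l && !(PySem.Str.startswith l pvFS))).getD lines.length
  (lines.take cut).filterMap (fun l =>
    if !(PySem.Str.startswith l pvFS) then
      let s := PySem.Str.strip l
      if s != "" then some s else none
    else none)

-- ===== PRECONDITION & SPEC =====
def Spec_clean_proxy_list (lines : List String) (out : List String) : Prop := out = clean_proxy_list_alt lines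
instance (lines : List String) (out : List String) : Decidable (Spec_clean_proxy_list lines out) := by unfold Spec_clean_proxy_list; infer_instance

-- ===== CLAIM (what is proved, stated in full; the proofs are below) =====
def Claim_equal_clean_proxy_list : Prop := ∀ (lines : List String), Dom_clean_proxy_list lines → Spec_clean_proxy_list lines (clean_proxy_list lines)

-- ===== LEMMAS AND PROOFS =====

-- abbreviation for A's loop body (proof-side only)
def pvStepA (st : List String × Bool) (line : String) : List String × Bool :=
  if PySem.Str.startswith line pvFS then st
  else if PySem.Str.isIn pvFE line then (st.1, true)
  else if st.2 then st
  else if PySem.Str.strip line != "" then (st.1 ++ [PySem.Str.strip line], st.2)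
  else st

lemma pvSkipTrue (lines : List String) (acc : List String) :
    (lines.foldl pvStepA (acc, true)).1 = acc := by
  induction lines generalizing acc with
  | nil => rfl
  | cons l ls ih =>
    simp only [List.foldl_cons, pvStepA]
    split_ifs <;> exact ih acc

lemma pvMain (lines : List String) (acc : List String) :
    (lines.foldl pvStepA (acc, false)).1 = acc ++ clean_proxy_list_alt lines := by
  induction lines generalizing acc with
  | nil => simp [clean_proxy_list_alt]
  | cons l ls ih =>
    simp only [List.foldl_cons, pvStepA]
    by_cases hs : PySem.Str.startswith l pvFS
    · have hs2 : PySem.Chars.startswith l.toList pvFS.toList = true := by simpa using hs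
      simp only [hs, if_true, ih]
      simp only [clean_proxy_list_alt, List.findIdx?_cons]
      simp [hs2]
    · have hs2 : PySem.Chars.startswith l.toList pvFS.toList = false := by simpa using hs
      by_cases he : PySem.Str.isIn pvFE l
      · have he2 : PySem.Chars.isIn pvFE.toList l.toList = true := by simpa using he
        simp only [hs, Bool.false_eq_true, if_false, he, if_true, pvSkipTrue]
        simp [clean_proxy_list_alt, List.findIdx?_cons, hs2, he2]
      · have he2 : PySem.Chars.isIn pvFE.toList l.toList = false := by simpa using he
        simp only [hs, he, Bool.false_eq_true, if_false]
        have halt : clean_proxy_list_alt (l :: ls) =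
            (if PySem.Str.strip l != "" then [PySem.Str.strip l] else []) ++ clean_proxy_list_alt ls := by
          simp only [clean_proxy_list_alt, List.findIdx?_cons]
          simp [hs2, he2]
          cases h : List.findIdx? (fun l => PySem.Chars.isIn pvFE.toList l.toList && !PySem.Chars.startswith l.toList pvFS.toList) ls <;>
            split_ifs <;> simp_all
        rw [halt]
        by_cases ht : PySem.Str.strip l = ""
        · simp [ht]
          exact ih acc
        · have ht2 : (PySem.Str.strip l != "") = true := by simpa using ht
          simp only [ht2, if_true, ih]
          simp

-- ===== VERDICT (by name: the statement is the Claim_ definition above) =====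
theorem clean_proxy_list_spec : Claim_equal_clean_proxy_list := by
  intro lines _
  unfold Spec_clean_proxy_list clean_proxy_list
  have h : (fun (st : List String × Bool) line =>
      if PySem.Str.startswith line pvFS then st
      else if PySem.Str.isIn pvFE line then (st.1, true)
      else if st.2 then st
      else if PySem.Str.strip line != "" then (st.1 ++ [PySem.Str.strip line], st.2)
      else st) = pvStepA := rfl
  rw [h, pvMain]
  simp
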